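-- pv_equiv track=rewrite | github.com/tigusa1/Dash_USAID | Dash_ODE_SDR_simple.py | update_colors
-- ===== SOURCE A (Python) =====
-- def update_colors(F_clicks, F_styles, F_combination_styles):
--     idx = 0
--     F_combination_styles[1]['color'] = '#000' # default color if no F_slider_buttons are selected
--     for click in F_clicks:
--         if click % 2 == 1:
--             F_combination_styles[1]['color'] = '#f50'
--             F_styles[idx]['color'] = '#f50'
--         else:
--             F_styles[idx]['color'] = '#000'
--         idx += 1
--     return F_styles, F_combination_styles
-- ===== SOURCE B (Python) =====
-- def update_colors(F_clicks, F_styles, F_combination_styles):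
--     # Functional reconstruction: build the per-slider color list once, derive new
--     # style dicts by dict-merge over zip (dangling styles pass through), and pick
--     # the combination color by membership. Returns fresh lists (A mutates in place;
--     # the equivalence claimed is about the return value).
--     colors = ['#f50' if c % 2 == 1 else '#000' for c in F_clicks]
--     styles = [{**s, 'color': col} for s, col in zip(F_styles, colors)] \
--              + F_styles[len(F_clicks):]
--     comb = list(F_combination_styles)
--     comb[1] = {**comb[1], 'color': '#f50' if '#f50' in colors else '#000'}
--     return styles, comb
-- ===== Notes on version B (the rewrite author's own statement) =====
-- stated objective: idiomatic
-- what changed: Replaced the index-driven mutating loop by a functional pipeline: a color list comprehension, a zip/dict-merge comprehension that rebuilds the styles (no index, no mutation), and a membership test on the color list for the combination color.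
import Mathlib
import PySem

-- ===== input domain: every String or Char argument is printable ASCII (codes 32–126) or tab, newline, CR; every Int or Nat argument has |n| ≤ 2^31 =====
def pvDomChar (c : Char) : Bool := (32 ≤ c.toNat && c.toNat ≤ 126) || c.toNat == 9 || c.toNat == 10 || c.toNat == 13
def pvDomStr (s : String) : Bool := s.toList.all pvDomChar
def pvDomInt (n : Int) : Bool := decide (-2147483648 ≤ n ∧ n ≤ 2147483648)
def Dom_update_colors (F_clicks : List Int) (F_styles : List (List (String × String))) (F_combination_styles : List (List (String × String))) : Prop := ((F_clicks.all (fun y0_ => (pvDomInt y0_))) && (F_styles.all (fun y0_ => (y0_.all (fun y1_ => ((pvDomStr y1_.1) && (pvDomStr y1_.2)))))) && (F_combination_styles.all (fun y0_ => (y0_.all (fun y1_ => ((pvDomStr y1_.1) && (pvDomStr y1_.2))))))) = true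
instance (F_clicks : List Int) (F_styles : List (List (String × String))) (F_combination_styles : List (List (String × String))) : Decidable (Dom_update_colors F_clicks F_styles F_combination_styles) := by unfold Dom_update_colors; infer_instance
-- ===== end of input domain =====

-- B rebuilds the styles functionally (color list, zip/dict-merge, passthrough tail,
-- membership test for the combination color) instead of A's index-driven mutating loop;
-- A mutates its arguments in place, B returns fresh lists — equality proved on return values.

-- d['color'] = v and {**d, 'color': v} coincide: overwrite in place, append if new
def dictSet (d : List (String × String)) (k v : String) : List (String × String) :=
  ((PySem.Dict.mk d).insert k v).items

-- F_styles[idx]['color'] = c (read-modify-write of the idx-th dict)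
def setStyle (styles : List (List (String × String))) (i : Nat) (c : String) : List (List (String × String)) :=
  styles.set i (dictSet (styles.getD i []) "color" c)

-- comb[1] = {**comb[1], 'color': c} (also A's F_combination_styles[1]['color'] = c)
def setComb (comb : List (List (String × String))) (c : String) : List (List (String × String)) :=
  comb.set 1 (dictSet (comb.getD 1 []) "color" c)

-- ===== PORT A =====
def update_colors (F_clicks : List Int) (F_styles : List (List (String × String))) (F_combination_styles : List (List (String × String))) : (List (List (String × String))) × (List (List (String × String))) :=
  let comb0 := setComb F_combination_styles "#000"
  let st := F_clicks.foldl
    (fun (acc : List (List (String × String)) × List (List (String × String)) × Nat) click =>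
      if PySem.Int.mod click 2 == 1 then
        (setStyle acc.1 acc.2.2 "#f50", setComb acc.2.1 "#f50", acc.2.2 + 1)
      else
        (setStyle acc.1 acc.2.2 "#000", acc.2.1, acc.2.2 + 1))
    (F_styles, comb0, 0)
  (st.1, st.2.1)

-- ===== PORT B =====
def update_colors_alt (F_clicks : List Int) (F_styles : List (List (String × String))) (F_combination_styles : List (List (String × String))) : (List (List (String × String))) × (List (List (String × String))) :=
  let colors := F_clicks.map (fun c => if PySem.Int.mod c 2 == 1 then "#f50" else "#000")
  let styles := ((F_styles.zip colors).map (fun p => dictSet p.1 "color" p.2))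
      ++ PySem.List.slice F_styles (some (F_clicks.length : Int)) none  -- F_styles[len(F_clicks):]
  let comb := setComb F_combination_styles (if colors.contains "#f50" then "#f50" else "#000")
  (styles, comb)

-- ===== PRECONDITION & SPEC =====
-- Python A raises IndexError when F_combination_styles has fewer than 2 entries or
-- F_clicks is longer than F_styles; Pre_ excludes exactly those inputs.
def Pre_update_colors (F_clicks : List Int) (F_styles : List (List (String × String))) (F_combination_styles : List (List (String × String))) : Prop :=
  2 ≤ F_combination_styles.length ∧ F_clicks.length ≤ F_styles.length
instance (F_clicks : List Int) (F_styles : List (List (String × String))) (F_combination_styles : List (List (String × String))) : Decidable (Pre_update_colors F_clicks F_styles F_combination_styles) := by unfold Pre_update_colors; infer_instance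

def pvWitness_update_colors : List Int × (List (List (String × String))) × (List (List (String × String))) :=
  ([1, 2], [[("color", "#000")], []], [[], [("color", "#111")]])

def Spec_update_colors (F_clicks : List Int) (F_styles : List (List (String × String))) (F_combination_styles : List (List (String × String))) (out : (List (List (String × String))) × (List (List (String × String)))) : Prop := out = update_colors_alt F_clicks F_styles F_combination_styles
instance (F_clicks : List Int) (F_styles : List (List (String × String))) (F_combination_styles : List (List (String × String))) (out : (List (List (String × String))) × (List (List (String × String)))) : Decidable (Spec_update_colors F_clicks F_styles F_combination_styles out) := by unfold Spec_update_colors; infer_instance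

-- ===== CLAIM (what is proved, stated in full; the proofs are below) =====
def Claim_equal_update_colors : Prop := ∀ (F_clicks : List Int) (F_styles : List (List (String × String))) (F_combination_styles : List (List (String × String))), Dom_update_colors F_clicks F_styles F_combination_styles → Pre_update_colors F_clicks F_styles F_combination_styles → Spec_update_colors F_clicks F_styles F_combination_styles (update_colors F_clicks F_styles F_combination_styles)

-- ===== LEMMAS AND PROOFS =====

-- overwriting the same key twice keeps only the last value
theorem dictSet_dictSet (d : List (String × String)) (k v w : String) :
    dictSet (dictSet d k v) k w = dictSet d k w :=
  congrArg PySem.Dict.items (PySem.Dict.insert_insert_self (PySem.Dict.mk d) k v w)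

-- writing F_combination_styles[1] twice keeps only the last value
theorem setComb_setComb (comb : List (List (String × String))) (c c' : String) :
    setComb (setComb comb c) c' = setComb comb c' := by
  by_cases h : 1 < comb.length
  · simp [setComb, List.getD, h, List.set_set, dictSet_dictSet]
  · have hs : ∀ x, comb.set 1 x = comb := fun x => List.set_eq_of_length_le (by omega)
    simp [setComb, hs]

-- applying a list of precomputed colors to consecutive styles
def applyColors : List String → List (List (String × String)) → Nat → List (List (String × String))
  | [], s, _ => s
  | col :: cols, s, i => applyColors cols (setStyle s i col) (i + 1)

-- A's interleaved loop = apply the mapped color list, with the combination dict written once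
theorem foldA_eq (cs : List Int) (s : List (List (String × String)))
    (comb : List (List (String × String))) (i : Nat) :
    cs.foldl
      (fun (acc : List (List (String × String)) × List (List (String × String)) × Nat) click =>
        if PySem.Int.mod click 2 == 1 then
          (setStyle acc.1 acc.2.2 "#f50", setComb acc.2.1 "#f50", acc.2.2 + 1)
        else
          (setStyle acc.1 acc.2.2 "#000", acc.2.1, acc.2.2 + 1))
      (s, comb, i)
    = (applyColors (cs.map (fun c => if PySem.Int.mod c 2 == 1 then "#f50" else "#000")) s i,
       (if cs.any (fun c => PySem.Int.mod c 2 == 1) then setComb comb "#f50" else comb),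
       i + cs.length) := by
  induction cs generalizing s comb i with
  | nil => simp [applyColors]
  | cons c cs ih =>
    by_cases hc : (PySem.Int.mod c 2 == 1) = true
    · rw [List.foldl_cons]
      simp only []
      rw [if_pos hc, ih, setComb_setComb, ite_self]
      simp only [List.map_cons, applyColors, List.any_cons, hc, Bool.true_or, if_true,
        List.length_cons, Prod.mk.injEq, true_and]
      omega
    · have hcf : (PySem.Int.mod c 2 == 1) = false := Bool.eq_false_iff.mpr hc
      rw [List.foldl_cons]
      simp only []
      rw [if_neg hc, ih]
      simp only [List.map_cons, applyColors, List.any_cons, hcf, Bool.false_or,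
        Bool.false_eq_true, if_false, List.length_cons, Prod.mk.injEq, true_and]
      omega

-- shifting the running index past an untouched head
theorem applyColors_cons (cols : List String) (h : List (String × String))
    (s : List (List (String × String))) (i : Nat) :
    applyColors cols (h :: s) (i + 1) = h :: applyColors cols s i := by
  induction cols generalizing h s i with
  | nil => simp [applyColors]
  | cons col cols ih =>
    simp only [applyColors, setStyle, List.set_cons_succ, List.getD, List.getElem?_cons_succ]
    exact ih _ _ _

-- applying colors from index 0 = B's zip/dict-merge map plus passthrough tail
theorem applyColors_eq_map (cols : List String) (s : List (List (String × String)))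
    (hle : cols.length ≤ s.length) :
    applyColors cols s 0
      = ((s.zip cols).map (fun p => dictSet p.1 "color" p.2)) ++ s.drop cols.length := by
  induction cols generalizing s with
  | nil => simp [applyColors]
  | cons col cols ih =>
    cases s with
    | nil => simp at hle
    | cons t ts =>
      have h0 : setStyle (t :: ts) 0 col = dictSet t "color" col :: ts := by
        simp [setStyle, List.getD]
      rw [applyColors, h0, applyColors_cons, ih ts (by simpa using hle)]
      simp

-- membership of "#f50" in the mapped color list = some click passes the parity test
theorem contains_map_ite {α : Type} (p : α → Bool) (cs : List α) :
    (cs.map (fun c => if p c then "#f50" else "#000")).contains "#f50" = cs.any p := by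
  induction cs with
  | nil => rfl
  | cons c cs ih =>
    by_cases hp : p c <;> simp [hp, List.any_eq]

theorem update_colors_eq_alt (F_clicks : List Int) (F_styles : List (List (String × String)))
    (F_combination_styles : List (List (String × String)))
    (hle : F_clicks.length ≤ F_styles.length) :
    update_colors F_clicks F_styles F_combination_styles
      = update_colors_alt F_clicks F_styles F_combination_styles := by
  simp only [update_colors, update_colors_alt]
  rw [foldA_eq, setComb_setComb, contains_map_ite, PySem.List.slice_from_natCast]
  refine Prod.ext ?_ ?_
  · show applyColors _ _ 0 = _
    rw [applyColors_eq_map _ _ (by simpa using hle), List.length_map]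
  · show (if _ then setComb F_combination_styles "#f50" else setComb F_combination_styles "#000") = _
    rw [apply_ite (setComb F_combination_styles)]

-- ===== VERDICT (by name: the statements are the Claim_ definitions above) =====
theorem update_colors_spec : Claim_equal_update_colors := by
  intro F_clicks F_styles F_combination_styles _ hpre
  unfold Spec_update_colors
  exact update_colors_eq_alt F_clicks F_styles F_combination_styles hpre.2
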